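-- pv_equiv track=rewrite | github.com/daniel-echevarria/leetcode-solutions | python/338-countinb-bits.py | countBits
-- ===== SOURCE A (Python) =====
-- def countBits(n: int) -> list[int]:
--     threshold = 0
--     running = 0
--
--     res = []
--     for _ in range(n + 1):
--         res.append(running)
--         if running == threshold:
--             threshold += 1
--             running = 1
--             continue
--         running += 1
--     return res
-- ===== SOURCE B (Python) =====
-- def countBits(n: int) -> list[int]:
--     remaining = n + 1
--     if remaining <= 0:
--         return []
--     res = [0]
--     remaining -= 1
--     k = 1
--     while remaining > 0:
--         ramp = list(range(1, k + 1))[:remaining]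
--         res += ramp
--         remaining -= len(ramp)
--         k += 1
--     return res
-- ===== Notes on version B (the rewrite author's own statement) =====
-- stated objective: alternative
-- what changed: Replaces A's flat per-element threshold/reset state machine with a closed view of the output as [0] followed by whole ascending ramps 1..k, appending each ramp as a truncated range slice.
import Mathlib
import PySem

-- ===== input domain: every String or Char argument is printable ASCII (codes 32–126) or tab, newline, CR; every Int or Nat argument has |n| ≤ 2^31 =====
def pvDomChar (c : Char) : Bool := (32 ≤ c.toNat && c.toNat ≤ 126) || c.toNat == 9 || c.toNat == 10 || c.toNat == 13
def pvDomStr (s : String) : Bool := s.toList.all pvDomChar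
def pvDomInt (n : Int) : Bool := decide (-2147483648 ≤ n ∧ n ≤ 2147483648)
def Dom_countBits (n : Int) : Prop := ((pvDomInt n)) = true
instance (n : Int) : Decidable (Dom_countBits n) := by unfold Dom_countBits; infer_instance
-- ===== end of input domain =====

-- B rebuilds the sequence as [0] followed by whole ascending ramps 1..k appended as truncated
-- range slices, instead of A's per-element threshold/reset state machine. Same O(n) cost.

-- ===== PORT A =====
def countBits (n : Int) : List Int :=
  ((PySem.List.pyRange 0 (n + 1) 1).foldl
    (fun (st : Int × Int × List Int) _ =>
      let threshold := st.1
      let running := st.2.1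
      let res := st.2.2 ++ [running]
      if running = threshold then (threshold + 1, 1, res)
      else (threshold, running + 1, res))
    (0, 0, [])).2.2

-- ===== PORT B =====
-- B's while loop; `remaining` counts elements still to append (remaining = count - len(res)),
-- `km1` is k - 1 so the decreasing measure needs no side invariant.
def rampLoop (remaining : Nat) (km1 : Nat) (res : List Int) : List Int :=
  if remaining = 0 then res
  else
    rampLoop (remaining - (km1 + 1)) (km1 + 1)
      (res ++ (PySem.List.pyRange 1 ((km1 : Int) + 2) 1).take remaining)
  termination_by remaining
  decreasing_by omega

def countBits_alt (n : Int) : List Int :=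
  let remaining := n + 1
  if remaining ≤ 0 then []
  else rampLoop (remaining.toNat - 1) 0 [0]

-- ===== PRECONDITION & SPEC =====
def Spec_countBits (n : Int) (out : List Int) : Prop := out = countBits_alt n
instance (n : Int) (out : List Int) : Decidable (Spec_countBits n out) := by unfold Spec_countBits; infer_instance

-- ===== CLAIM (what is proved, stated in full; the proofs are below) =====
def Claim_equal_countBits : Prop := ∀ (n : Int), Dom_countBits n → Spec_countBits n (countBits n)

-- ===== LEMMAS AND PROOFS =====

-- A's step, and the list it generates from state (threshold t, running r) in m steps.
def stepA (st : Int × Int × List Int) : Int × Int × List Int :=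
  let threshold := st.1
  let running := st.2.1
  let res := st.2.2 ++ [running]
  if running = threshold then (threshold + 1, 1, res)
  else (threshold, running + 1, res)

def genA (m : Nat) (t r : Int) : List Int :=
  match m with
  | 0 => []
  | m + 1 => r :: (if r = t then genA m (t + 1) 1 else genA m t (r + 1))

-- B's suffix generator: elements rampLoop appends from (remaining, km1).
def genB (rem km1 : Nat) : List Int :=
  if rem = 0 then []
  else (PySem.List.pyRange 1 ((km1 : Int) + 2) 1).take rem ++ genB (rem - (km1 + 1)) (km1 + 1)
  termination_by rem
  decreasing_by omega

theorem foldl_stepA (l : List Int) (t r : Int) (res : List Int) :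
    (l.foldl (fun st _ => stepA st) (t, r, res)).2.2 = res ++ genA l.length t r := by
  induction l generalizing t r res with
  | nil => simp [genA]
  | cons x xs ih =>
    rw [List.foldl_cons]
    by_cases h : r = t
    · have hs : stepA (t, r, res) = (t + 1, 1, res ++ [r]) := by simp [stepA, h]
      rw [hs, ih]
      simp [genA, h]
    · have hs : stepA (t, r, res) = (t, r + 1, res ++ [r]) := by simp [stepA, h]
      rw [hs, ih]
      simp [genA, h]

theorem countBits_eq_genA (n : Int) :
    countBits n = genA (n + 1).toNat 0 0 := by
  have h : (fun (st : Int × Int × List Int) (_ : Int) =>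
      let threshold := st.1
      let running := st.2.1
      let res := st.2.2 ++ [running]
      if running = threshold then (threshold + 1, 1, res)
      else (threshold, running + 1, res)) = fun (st : Int × Int × List Int) (_ : Int) => stepA st := rfl
  have hlen : (PySem.List.pyRange 0 (n + 1) 1).length = (n + 1 - 0).toNat :=
    PySem.List.length_pyRange_one 0 (n + 1)
  simp only [countBits, h, foldl_stepA, List.nil_append]
  rw [hlen]; norm_num

theorem rampLoop_eq_genB (rem km1 : Nat) (res : List Int) :
    rampLoop rem km1 res = res ++ genB rem km1 := by
  induction rem using Nat.strong_induction_on generalizing km1 res with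
  | _ rem ih =>
    rw [rampLoop, genB]
    by_cases h : rem = 0
    · simp [h]
    · rw [if_neg h, if_neg h, ih (rem - (km1 + 1)) (by omega), List.append_assoc]

theorem genB_zero (m : Nat) :
    genB m 0 = (PySem.List.pyRange 1 2 1).take m ++ genB (m - 1) 1 := by
  rw [genB]
  by_cases h : m = 0
  · simp [h, genB]
  · rw [if_neg h]; norm_num

-- The ramp lemma: from mid-ramp state (threshold k+1, running j+1), A emits the tail of the
-- current ramp (truncated to m elements) and then B's remaining ramps.
theorem genA_ramp (m : Nat) : ∀ j k : Nat, j ≤ k →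
    genA m ((k : Int) + 1) ((j : Int) + 1) =
      (PySem.List.pyRange ((j : Int) + 1) ((k : Int) + 2) 1).take m ++ genB (m - (k + 1 - j)) (k + 1) := by
  induction m with
  | zero =>
    intro j k hjk
    simp [genA, genB, show (0 : Nat) - (k + 1 - j) = 0 by omega]
  | succ m ih =>
    intro j k hjk
    have hcons : PySem.List.pyRange ((j : Int) + 1) ((k : Int) + 2) 1
        = ((j : Int) + 1) :: PySem.List.pyRange ((j : Int) + 1 + 1) ((k : Int) + 2) 1 :=
      PySem.List.pyRange_one_cons (by push_cast; omega)
    by_cases hj : j = k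
    · subst hj
      have h1 : genA m ((j : Int) + 1 + 1) 1 =
          (PySem.List.pyRange 1 ((j : Int) + 3) 1).take m ++ genB (m - (j + 2)) (j + 2) := by
        have := ih 0 (j + 1) (by omega)
        push_cast at this ⊢
        convert this using 3 <;> omega
      have hR : (PySem.List.pyRange ((j : Int) + 1) ((j : Int) + 2) 1).take (m + 1) = [(j : Int) + 1] := by
        rw [hcons, PySem.List.pyRange_one_eq_nil (by omega)]
        simp
      rw [hR, show m + 1 - (j + 1 - j) = m by omega]
      have hL : genA (m + 1) ((j : Int) + 1) ((j : Int) + 1)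
          = ((j : Int) + 1) :: genA m ((j : Int) + 1 + 1) 1 := by simp [genA]
      rw [hL, h1]
      by_cases hm : m = 0
      · simp [hm, genB]
      · conv_rhs => rw [genB]
        rw [if_neg hm]
        push_cast
        simp only [List.cons_append]
        rw [show ((j : Int) + 1 + 2) = (j : Int) + 3 by ring]
        norm_num
    · have hjk' : j + 1 ≤ k := by omega
      simp only [genA]
      rw [if_neg (by push_cast; omega)]
      have h1 := ih (j + 1) k hjk'
      push_cast at h1
      rw [h1, hcons, List.take_succ_cons, List.cons_append,
        show m + 1 - (k + 1 - j) = m - (k - j) by omega]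

theorem countBits_spec' : ∀ (n : Int), countBits n = countBits_alt n := by
  intro n
  rw [countBits_eq_genA, countBits_alt]
  by_cases hn : n + 1 ≤ 0
  · simp [hn, show (n + 1).toNat = 0 by omega, genA]
  · rw [if_neg hn]
    obtain ⟨m, hmeq⟩ : ∃ m : Nat, (n + 1).toNat = m + 1 := ⟨(n + 1).toNat - 1, by omega⟩
    rw [hmeq, rampLoop_eq_genB, show m + 1 - 1 = m by omega]
    rw [show genA (m + 1) 0 0 = 0 :: genA m 1 1 from by simp [genA]]
    have h := genA_ramp m 0 0 (le_refl 0)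
    norm_num at h
    rw [h, ← genB_zero]
    rfl

-- ===== VERDICT (by name: the statement is the Claim_ definition above) =====
theorem countBits_spec : Claim_equal_countBits := by
  intro n _
  unfold Spec_countBits
  exact countBits_spec' n
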